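-- pv_equiv track=rewrite | github.com/sourishdey2005/Mimi | Ananya.py | severity_score
-- ===== SOURCE A (Python) =====
-- def severity_score(symptoms_list, duration, comorbidities_list):
--     score = 0
--     for s in symptoms_list:
--         if s.lower() in ['difficulty breathing', 'chest pain', 'severe abdominal pain', 'blood in sputum']:
--             score += 3
--         elif s.lower() in ['high fever', 'persistent vomiting', 'dehydration']:
--             score += 2
--         else:
--             score += 1
--     score += min(duration // 3, 3)
--     score += len(comorbidities_list)
--     return score
-- ===== SOURCE B (Python) =====
-- HIGH = {'difficulty breathing', 'chest pain', 'severe abdominal pain', 'blood in sputum'}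
-- MED = {'high fever', 'persistent vomiting', 'dehydration'}
--
-- def severity_score(symptoms_list, duration, comorbidities_list):
--     lows = [s.lower() for s in symptoms_list]
--     high = sum(1 for s in lows if s in HIGH)
--     med = sum(1 for s in lows if s in MED)
--     return len(symptoms_list) + 2 * high + med + min(duration // 3, 3) + len(comorbidities_list)
-- ===== Notes on version B (the rewrite author's own statement) =====
-- stated objective: alternative
-- what changed: Replaces the three-way if/elif accumulator loop with category counts (high, medium) combined arithmetically as len + 2*high + med, relying on disjointness of the two severity sets.
import Mathlib
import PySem

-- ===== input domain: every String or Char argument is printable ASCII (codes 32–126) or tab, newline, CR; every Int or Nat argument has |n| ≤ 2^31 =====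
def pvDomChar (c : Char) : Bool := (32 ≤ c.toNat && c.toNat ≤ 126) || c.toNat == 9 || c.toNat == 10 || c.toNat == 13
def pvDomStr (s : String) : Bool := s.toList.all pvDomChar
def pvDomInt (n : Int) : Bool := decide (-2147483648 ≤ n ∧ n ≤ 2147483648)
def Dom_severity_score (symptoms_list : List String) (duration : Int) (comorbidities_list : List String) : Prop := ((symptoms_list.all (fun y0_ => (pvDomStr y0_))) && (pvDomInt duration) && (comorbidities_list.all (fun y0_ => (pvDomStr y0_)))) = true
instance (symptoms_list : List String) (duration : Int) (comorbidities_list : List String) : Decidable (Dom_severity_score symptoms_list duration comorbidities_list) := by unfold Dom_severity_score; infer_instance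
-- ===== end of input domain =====

-- B replaces the if/elif/else accumulator loop by two category counts combined
-- arithmetically (len + 2*high + med); an alternative decomposition, same cost.

-- ===== PORT A =====
def sevHigh : List String := ["difficulty breathing", "chest pain", "severe abdominal pain", "blood in sputum"]
def sevMed : List String := ["high fever", "persistent vomiting", "dehydration"]

def severity_score (symptoms_list : List String) (duration : Int) (comorbidities_list : List String) : Int :=
  let score : Int := 0
  let score := symptoms_list.foldl (fun score s =>
    if (PySem.Str.lower s) ∈ sevHigh then score + 3
    else if (PySem.Str.lower s) ∈ sevMed then score + 2
    else score + 1) score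
  let score := score + min (PySem.Int.floordiv duration 3) 3
  let score := score + (comorbidities_list.length : Int)
  score

-- ===== PORT B =====
def severity_score_alt (symptoms_list : List String) (duration : Int) (comorbidities_list : List String) : Int :=
  let lows := symptoms_list.map PySem.Str.lower
  let high : Int := (lows.countP (fun s => s ∈ sevHigh) : Nat)
  let med : Int := (lows.countP (fun s => s ∈ sevMed) : Nat)
  (symptoms_list.length : Int) + 2 * high + med + min (PySem.Int.floordiv duration 3) 3 + (comorbidities_list.length : Int)

-- ===== PRECONDITION & SPEC =====
def Spec_severity_score (symptoms_list : List String) (duration : Int) (comorbidities_list : List String) (out : Int) : Prop := out = severity_score_alt symptoms_list duration comorbidities_list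
instance (symptoms_list : List String) (duration : Int) (comorbidities_list : List String) (out : Int) : Decidable (Spec_severity_score symptoms_list duration comorbidities_list out) := by unfold Spec_severity_score; infer_instance

-- ===== CLAIM (what is proved, stated in full; the proofs are below) =====
def Claim_equal_severity_score : Prop := ∀ (symptoms_list : List String) (duration : Int) (comorbidities_list : List String), Dom_severity_score symptoms_list duration comorbidities_list → Spec_severity_score symptoms_list duration comorbidities_list (severity_score symptoms_list duration comorbidities_list)

-- ===== LEMMAS AND PROOFS =====

-- the two severity categories are disjoint
theorem sev_disjoint (t : String) (h : t ∈ sevHigh) : t ∉ sevMed := by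
  simp only [sevHigh, List.mem_cons, List.not_mem_nil, or_false] at h
  rcases h with h | h | h | h <;> subst h <;> decide

-- loop invariant: the fold equals the start plus the arithmetic combination
theorem sev_fold (l : List String) (a : Int) :
    l.foldl (fun score s =>
      if (PySem.Str.lower s) ∈ sevHigh then score + 3
      else if (PySem.Str.lower s) ∈ sevMed then score + 2
      else score + 1) a
    = a + (l.length : Int)
      + 2 * ((l.map PySem.Str.lower).countP (fun s => s ∈ sevHigh) : Nat)
      + ((l.map PySem.Str.lower).countP (fun s => s ∈ sevMed) : Nat) := by
  induction l generalizing a with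
  | nil => simp
  | cons x t ih =>
    simp only [List.foldl_cons, List.map_cons, List.countP_cons, ih]
    by_cases hh : (PySem.Str.lower x) ∈ sevHigh
    · have hm := sev_disjoint _ hh
      simp [hh, hm]; ring
    · by_cases hm : (PySem.Str.lower x) ∈ sevMed
      · simp [hh, hm]; ring
      · simp [hh, hm]; ring

-- ===== VERDICT (by name: the statement is the Claim_ definition above) =====
theorem severity_score_spec : Claim_equal_severity_score := by
  intro l d c _
  unfold Spec_severity_score severity_score severity_score_alt
  simp only [sev_fold]
  ring
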